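-- pv_equiv track=rewrite | github.com/saliou95/Hackathon-Enedis-project | Connection.py | skip_null
-- ===== SOURCE A (Python) =====
-- def skip_null(tmp,ind, rng=12):
--     cons_by_month= []
--
--     j = 0
--     for i in range(rng):
--         if i + 1 in ind:
--             cons_by_month.append(str(tmp[j]))
--             j += 1
--         else:
--             cons_by_month.append("N/A")
--
--     cons_by_month = list(cons_by_month)
--     return cons_by_month
-- ===== SOURCE B (Python) =====
-- def skip_null(tmp, ind, rng=12):
--     matched = [m for m in range(1, rng + 1) if m in ind]
--     result = ["N/A"] * rng
--     for j, m in enumerate(matched):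
--         result[m - 1] = str(tmp[j])
--     return result
-- ===== Notes on version B (the rewrite author's own statement) =====
-- stated objective: alternative
-- what changed: A builds the result in one pass, appending and advancing a running tmp-cursor per month; B first collects the ascending list of matched months, preallocates an all-'N/A' list, then places str(tmp[j]) at position m-1 for each matched month.
import Mathlib
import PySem

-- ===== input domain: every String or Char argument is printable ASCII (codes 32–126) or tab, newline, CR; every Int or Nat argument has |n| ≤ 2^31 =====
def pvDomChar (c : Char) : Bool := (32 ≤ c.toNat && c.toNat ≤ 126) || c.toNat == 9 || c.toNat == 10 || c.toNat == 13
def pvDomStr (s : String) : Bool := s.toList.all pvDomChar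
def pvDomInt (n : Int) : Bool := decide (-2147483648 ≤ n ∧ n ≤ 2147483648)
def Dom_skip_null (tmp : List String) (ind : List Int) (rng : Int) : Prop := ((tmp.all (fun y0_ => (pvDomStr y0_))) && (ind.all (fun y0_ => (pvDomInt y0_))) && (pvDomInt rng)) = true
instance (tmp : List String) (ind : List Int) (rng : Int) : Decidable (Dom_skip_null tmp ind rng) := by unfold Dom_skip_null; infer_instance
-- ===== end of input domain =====

-- B re-decomposes A's single accumulating loop with a running tmp-cursor into: collect the
-- matched months, preallocate an all-"N/A" list, then place each tmp value at its month slot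
-- (objective: alternative decomposition, same cost).

-- ===== PORT A =====
-- A: one pass over range(rng), appending either str(tmp[j]) (advancing j) or "N/A".
def skip_null (tmp : List String) (ind : List Int) (rng : Int) : List String :=
  ((PySem.List.pyRange 0 rng 1).foldl
    (fun (st : List String × Int) i =>
      if ind.contains (i + 1) then (st.1 ++ [PySem.List.pyGetD tmp st.2 ""], st.2 + 1)
      else (st.1 ++ ["N/A"], st.2))
    ([], 0)).1

-- ===== PORT B =====
-- B: matched = [m for m in range(1, rng+1) if m in ind]; result = ["N/A"]*rng;
--    for j, m in enumerate(matched): result[m-1] = str(tmp[j]).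
def skip_null_alt (tmp : List String) (ind : List Int) (rng : Int) : List String :=
  let matched := (PySem.List.pyRange 1 (rng + 1) 1).filter (fun m => ind.contains m)
  (PySem.List.enumerate matched 0).foldl
    (fun res jm => PySem.List.pySetD res (jm.2 - 1) (PySem.List.pyGetD tmp jm.1 ""))
    (List.replicate rng.toNat "N/A")

-- ===== PRECONDITION & SPEC =====
-- Pre_ excludes exactly the inputs on which Python A raises IndexError (more matched months
-- in 1..rng than entries in tmp); Python B raises IndexError on exactly the same inputs.
def Pre_skip_null (tmp : List String) (ind : List Int) (rng : Int) : Prop :=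
  (PySem.Set.ofList ind).countP (fun m => decide (1 ≤ m ∧ m ≤ rng)) ≤ tmp.length
instance (tmp : List String) (ind : List Int) (rng : Int) : Decidable (Pre_skip_null tmp ind rng) := by unfold Pre_skip_null; infer_instance

def pvWitness_skip_null : List String × List Int × Int := (["7", "x"], [2, 5], 6)

def Spec_skip_null (tmp : List String) (ind : List Int) (rng : Int) (out : List String) : Prop := out = skip_null_alt tmp ind rng
instance (tmp : List String) (ind : List Int) (rng : Int) (out : List String) : Decidable (Spec_skip_null tmp ind rng out) := by unfold Spec_skip_null; infer_instance

-- ===== CLAIM (what is proved, stated in full; the proofs are below) =====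
def Claim_equal_skip_null : Prop := ∀ (tmp : List String) (ind : List Int) (rng : Int), Dom_skip_null tmp ind rng → Pre_skip_null tmp ind rng → Spec_skip_null tmp ind rng (skip_null tmp ind rng)

-- ===== LEMMAS AND PROOFS =====

-- number of matched months among 1..n
def pvCnt (ind : List Int) (n : Nat) : Nat :=
  (List.range n).countP (fun (k : Nat) => ind.contains ((k : Int) + 1))

-- the common value of both programs on rng = n >= 0
def pvSpec (tmp : List String) (ind : List Int) (n : Nat) : List String :=
  (List.range n).map (fun (i : Nat) =>
    if ind.contains ((i : Int) + 1) then tmp.getD (pvCnt ind i) "" else "N/A")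

lemma pvSpec_length (tmp : List String) (ind : List Int) (n : Nat) :
    (pvSpec tmp ind n).length = n := by simp [pvSpec]

lemma pvCnt_succ (ind : List Int) (n : Nat) :
    pvCnt ind (n + 1) = pvCnt ind n + (if ((n : Int) + 1) ∈ ind then 1 else 0) := by
  by_cases h : ((n : Int) + 1) ∈ ind <;>
    simp [pvCnt, List.range_succ, List.countP_append, h]

lemma pvSpec_succ (tmp : List String) (ind : List Int) (n : Nat) :
    pvSpec tmp ind (n + 1)
      = pvSpec tmp ind n
        ++ [if ((n : Int) + 1) ∈ ind then tmp.getD (pvCnt ind n) "" else "N/A"] := by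
  by_cases h : ((n : Int) + 1) ∈ ind <;>
    simp [pvSpec, List.range_succ, h]

-- ---- A side ----
lemma skip_null_inv (tmp : List String) (ind : List Int) (n : Nat) :
    ((List.range n).map (fun (k : Nat) => (k : Int))).foldl
      (fun (st : List String × Int) i =>
        if ind.contains (i + 1) then (st.1 ++ [PySem.List.pyGetD tmp st.2 ""], st.2 + 1)
        else (st.1 ++ ["N/A"], st.2))
      ([], 0)
    = (pvSpec tmp ind n, (pvCnt ind n : Int)) := by
  induction n with
  | zero => simp [pvSpec, pvCnt]
  | succ n ih =>
    rw [List.range_succ, List.map_append, List.foldl_append, ih]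
    rw [pvSpec_succ, pvCnt_succ]
    by_cases h : ((n : Int) + 1) ∈ ind <;> simp [h]

lemma skip_null_eq (tmp : List String) (ind : List Int) (n : Nat) :
    skip_null tmp ind (n : Int) = pvSpec tmp ind n := by
  unfold skip_null
  rw [PySem.List.pyRange_zero_natCast, skip_null_inv]

-- ---- B side ----
-- the months 1..n, as B's range produces them
lemma pyRange_one_shift (n : Nat) :
    PySem.List.pyRange 1 ((n : Int) + 1) 1
      = (List.range n).map (fun (k : Nat) => (k : Int) + 1) := by
  induction n with
  | zero => exact PySem.List.pyRange_one_eq_nil (by omega)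
  | succ n ih =>
    have h2 : ((n + 1 : Nat) : Int) + 1 = ((n : Int) + 1) + 1 := by push_cast; ring
    rw [h2, PySem.List.pyRange_one_succ_right (by omega), ih, List.range_succ]
    simp

def pvMs (ind : List Int) (n : Nat) : List Int :=
  ((List.range n).map (fun (k : Nat) => (k : Int) + 1)).filter (fun m => ind.contains m)

lemma pvMs_length (ind : List Int) (n : Nat) : (pvMs ind n).length = pvCnt ind n := by
  rw [pvMs, pvCnt, ← List.countP_eq_length_filter, List.countP_map]
  rfl

lemma pvMs_succ (ind : List Int) (n : Nat) :
    pvMs ind (n + 1)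
      = pvMs ind n ++ (if ((n : Int) + 1) ∈ ind then [(n : Int) + 1] else []) := by
  by_cases h : ((n : Int) + 1) ∈ ind <;>
    simp [pvMs, List.range_succ, List.filter_append, h]

lemma pvMs_mem (ind : List Int) (n : Nat) {m : Int} (hm : m ∈ pvMs ind n) :
    1 ≤ m ∧ m ≤ (n : Int) := by
  simp only [pvMs, List.mem_filter, List.mem_map] at hm
  obtain ⟨⟨k, hk, rfl⟩, _⟩ := hm
  have := List.mem_range.mp hk
  omega

-- sets at indices below l.length leave a trailing append untouched
lemma pvFold_append (tmp : List String) (xs : List (Int × Int)) (l t : List String)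
    (hx : ∀ jm ∈ xs, 0 ≤ jm.2 - 1 ∧ (jm.2 - 1).toNat < l.length) :
    xs.foldl (fun res jm => PySem.List.pySetD res (jm.2 - 1) (PySem.List.pyGetD tmp jm.1 "")) (l ++ t)
    = xs.foldl (fun res jm => PySem.List.pySetD res (jm.2 - 1) (PySem.List.pyGetD tmp jm.1 "")) l ++ t := by
  induction xs generalizing l with
  | nil => rfl
  | cons jm xs ih =>
    obtain ⟨h0, hlt⟩ := hx jm (by simp)
    simp only [List.foldl_cons]
    rw [PySem.List.pySetD_of_nonneg _ _ h0, PySem.List.pySetD_of_nonneg _ _ h0,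
      List.set_append_left _ _ hlt]
    exact ih _ (fun p hp => by
      have := hx p (by simp [hp]); simpa [List.length_set] using this)

lemma skip_null_alt_inv (tmp : List String) (ind : List Int) (n : Nat) :
    (PySem.List.enumerate (pvMs ind n) 0).foldl
      (fun res jm => PySem.List.pySetD res (jm.2 - 1) (PySem.List.pyGetD tmp jm.1 ""))
      (List.replicate n "N/A")
    = pvSpec tmp ind n := by
  induction n with
  | zero => simp [pvMs, pvSpec]
  | succ n ih =>
    have hrep : List.replicate (n + 1) "N/A" = List.replicate n "N/A" ++ ["N/A"] := by
      simp [List.replicate_succ']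
    have hbound : ∀ jm ∈ PySem.List.enumerate (pvMs ind n) 0,
        0 ≤ jm.2 - 1 ∧ (jm.2 - 1).toNat < (List.replicate n "N/A").length := by
      intro jm hjm
      rw [PySem.List.mem_enumerate_iff] at hjm
      obtain ⟨k, hk, rfl⟩ := hjm
      have := pvMs_mem ind n (List.getElem_mem hk)
      simp only [List.length_replicate]
      omega
    rw [pvMs_succ, hrep, pvSpec_succ]
    by_cases h : ((n : Int) + 1) ∈ ind
    · simp only [h, if_true, PySem.List.enumerate_append, List.foldl_append]
      rw [pvFold_append tmp _ _ _ hbound, ih]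
      have hlen : (0 : Int) + ((pvMs ind n).length : Int) = (pvCnt ind n : Int) := by
        rw [pvMs_length]; omega
      simp only [PySem.List.enumerate, hlen, List.foldl_cons, List.foldl_nil]
      have h1 : ((n : Int) + 1) - 1 = (n : Int) := by ring
      rw [h1, PySem.List.pySetD_of_nonneg _ _ (by omega)]
      have hn : ((n : Int)).toNat = (pvSpec tmp ind n).length := by
        rw [pvSpec_length]; omega
      rw [hn, List.set_append_right _ _ (le_refl _)]
      simp [PySem.List.pyGetD_natCast]
    · simp only [h, if_false, List.append_nil]
      rw [pvFold_append tmp _ _ _ hbound, ih]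

lemma skip_null_alt_eq (tmp : List String) (ind : List Int) (n : Nat) :
    skip_null_alt tmp ind (n : Int) = pvSpec tmp ind n := by
  unfold skip_null_alt
  simp only [pyRange_one_shift, Int.toNat_natCast]
  exact skip_null_alt_inv tmp ind n

-- ===== VERDICT (by name: the statement is the Claim_ definition above) =====
theorem skip_null_spec : Claim_equal_skip_null := by
  intro tmp ind rng _ _
  unfold Spec_skip_null
  by_cases h : 0 ≤ rng
  · obtain ⟨n, rfl⟩ := Int.eq_ofNat_of_zero_le h
    rw [skip_null_eq, skip_null_alt_eq]
  · have h1 : rng ≤ (0 : Int) := by omega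
    have h2 : rng + 1 ≤ (1 : Int) := by omega
    unfold skip_null skip_null_alt
    rw [PySem.List.pyRange_one_eq_nil h1, PySem.List.pyRange_one_eq_nil h2]
    simp [Int.toNat_of_nonpos h1]
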